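-- pv_equiv track=rewrite | github.com/reisenx/2110211-INTRO-DATA-STRUCT | 08 CP Priority Queue/Heap Node Relation/d62_q3a_heap_node_relation.py | checkDescendant
-- ===== SOURCE A (Python) =====
-- def checkDescendant(a:int, b:int) -> bool:
--     if(a == 0):
--         return True
--     while(b > a):
--         b = (b-1)//2
--     if(a == b):
--         return True
--     return False
-- ===== SOURCE B (Python) =====
-- def checkDescendant(a: int, b: int) -> bool:
--     if a == 0:
--         return True
--     # descend from a: [lo, hi] is the contiguous index range of a's
--     # descendants at the current depth
--     lo = hi = a
--     while lo <= b:
--         if b <= hi: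
--             return True
--         lo, hi = 2 * lo + 1, 2 * hi + 2
--     return False
-- ===== Notes on version B (the rewrite author's own statement) =====
-- stated objective: alternative
-- what changed: B walks top-down from a, expanding the contiguous descendant index range [lo,hi] one heap level at a time and testing whether b falls in it, instead of A's bottom-up climb of b through repeated (b-1)//2 parent steps.
import Mathlib
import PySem

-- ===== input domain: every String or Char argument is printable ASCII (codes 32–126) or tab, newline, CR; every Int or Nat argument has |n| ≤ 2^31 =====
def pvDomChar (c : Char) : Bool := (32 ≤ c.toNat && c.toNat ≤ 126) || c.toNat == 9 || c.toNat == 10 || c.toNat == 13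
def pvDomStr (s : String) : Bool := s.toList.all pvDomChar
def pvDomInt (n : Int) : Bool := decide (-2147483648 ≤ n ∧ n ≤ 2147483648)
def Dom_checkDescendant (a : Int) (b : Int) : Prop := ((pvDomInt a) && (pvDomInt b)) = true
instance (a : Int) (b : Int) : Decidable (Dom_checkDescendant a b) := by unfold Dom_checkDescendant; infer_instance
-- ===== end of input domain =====

-- B replaces A's bottom-up parent climb of b with a top-down expansion of a's
-- contiguous descendant index range; same cost, different traversal (objective: alternative).


-- ===== PORT A =====
-- A's `while b > a: b = (b-1)//2`; fuel is only a totality guard, sufficient on Pre_.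
def climbLoop (a : Int) : Nat → Int → Int
  | 0, b => b
  | Nat.succ n, b => if a < b then climbLoop a n (PySem.Int.floordiv (b - 1) 2) else b

def checkDescendant (a : Int) (b : Int) : Bool :=
  if a = 0 then true
  else decide (a = climbLoop a ((b - a).toNat + 1) b)

-- ===== PORT B =====
-- B's `while lo <= b: if b <= hi: return True; lo, hi = 2*lo+1, 2*hi+2`; fuel = totality guard.
def desLoop (b : Int) : Nat → Int → Int → Bool
  | 0, _, _ => false
  | Nat.succ n, lo, hi =>
      if lo ≤ b then (if b ≤ hi then true else desLoop b n (2 * lo + 1) (2 * hi + 2))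
      else false

def checkDescendant_alt (a : Int) (b : Int) : Bool :=
  if a = 0 then true
  else desLoop b ((b - a).toNat + 2) a a

-- ===== PRECONDITION & SPEC =====
-- Pre_ excludes exactly a ≤ -2 with b > a, where A's while loop never terminates
-- (the parent chain of b converges to -1 or -2, never reaching a value ≤ a).
def Pre_checkDescendant (a : Int) (b : Int) : Prop := -1 ≤ a ∨ b ≤ a
instance (a : Int) (b : Int) : Decidable (Pre_checkDescendant a b) := by
  unfold Pre_checkDescendant; infer_instance
def pvWitness_checkDescendant : Int × Int := (1, 4)

def Spec_checkDescendant (a : Int) (b : Int) (out : Bool) : Prop := out = checkDescendant_alt a b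
instance (a : Int) (b : Int) (out : Bool) : Decidable (Spec_checkDescendant a b out) := by
  unfold Spec_checkDescendant; infer_instance

-- ===== CLAIM (what is proved, stated in full; the proofs are below) =====
def Claim_equal_checkDescendant : Prop := ∀ (a : Int) (b : Int), Dom_checkDescendant a b → Pre_checkDescendant a b → Spec_checkDescendant a b (checkDescendant a b)

-- ===== LEMMAS AND PROOFS =====

-- level-k bounds of the descendant range of a: loF a k = 2^k(a+1)-1, hiF a k = 2^k(a+2)-2
def loF (a : Int) : Nat → Int
  | 0 => a
  | k + 1 => 2 * loF a k + 1

def hiF (a : Int) : Nat → Int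
  | 0 => a
  | k + 1 => 2 * hiF a k + 2

theorem loF_shift (a : Int) (k : Nat) : loF (2 * a + 1) k = loF a (k + 1) := by
  induction k with
  | zero => rfl
  | succ k ih => simp [loF, ih]

theorem hiF_shift (a : Int) (k : Nat) : hiF (2 * a + 2) k = hiF a (k + 1) := by
  induction k with
  | zero => rfl
  | succ k ih => simp [hiF, ih]

theorem loF_ge (a : Int) (h : -1 ≤ a) (k : Nat) : a ≤ loF a k := by
  induction k with
  | zero => simp [loF]
  | succ k ih => simp only [loF]; omega

theorem loF_grow (a : Int) (h : 0 ≤ a) (k : Nat) : a + k ≤ loF a k := by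
  induction k with
  | zero => simp [loF]
  | succ k ih => simp only [loF]; push_cast; omega

theorem loF_neg_one (k : Nat) : loF (-1) k = -1 := by
  induction k with
  | zero => rfl
  | succ k ih => simp [loF, ih]

theorem hiF_neg_one_grow (k : Nat) : (k : Int) - 1 ≤ hiF (-1) k := by
  induction k with
  | zero => simp [hiF]
  | succ k ih => simp only [hiF]; push_cast; omega

-- parent step vs. child range: lo ≤ (x-1)//2 ≤ hi  ↔  2lo+1 ≤ x ≤ 2hi+2
theorem parent_range (lo hi x : Int) :
    (lo ≤ PySem.Int.floordiv (x - 1) 2 ∧ PySem.Int.floordiv (x - 1) 2 ≤ hi) ↔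
      (2 * lo + 1 ≤ x ∧ x ≤ 2 * hi + 2) := by
  rw [PySem.Int.le_floordiv_iff_mul_le (by omega : (0:Int) < 2)]
  have h2 : PySem.Int.floordiv (x - 1) 2 ≤ hi ↔ x - 1 < (hi + 1) * 2 := by
    constructor
    · intro h
      have := (PySem.Int.floordiv_lt_iff_lt_mul (a := x - 1) (b := 2) (q := hi + 1)
        (by omega)).mp (by omega)
      exact this
    · intro h
      have := (PySem.Int.floordiv_lt_iff_lt_mul (a := x - 1) (b := 2) (q := hi + 1)
        (by omega)).mpr h
      omega
  rw [h2]; omega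

theorem parent_le (x : Int) (h : 0 ≤ x) : PySem.Int.floordiv (x - 1) 2 ≤ x - 1 := by
  have := (PySem.Int.floordiv_lt_iff_lt_mul (a := x - 1) (b := 2) (q := x) (by omega)).mpr
    (by omega)
  omega

-- b ≤ a case: membership in some level range forces b = a
theorem mem_range_of_le (a b : Int) (ha : -1 ≤ a) (hb : b ≤ a)
    (h : ∃ k, loF a k ≤ b ∧ b ≤ hiF a k) : b = a := by
  obtain ⟨k, hk1, hk2⟩ := h
  rcases eq_or_lt_of_le ha with h1 | h1
  · have := loF_neg_one k
    rw [← h1] at hk1 ⊢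
    omega
  · have ha0 : 0 ≤ a := by omega
    cases k with
    | zero => simp [loF, hiF] at hk1 hk2; omega
    | succ j =>
        have := loF_ge a ha j
        simp only [loF] at hk1
        omega

-- A's loop computes: result = a  ↔  b lies in some level range of a
theorem climb_iff (a : Int) (ha : -1 ≤ a) :
    ∀ (n : Nat) (b : Int), b ≤ a + n →
      (climbLoop a n b = a ↔ ∃ k, loF a k ≤ b ∧ b ≤ hiF a k) := by
  intro n
  induction n with
  | zero =>
      intro b hb
      simp only [climbLoop]
      constructor
      · intro h; exact ⟨0, by simp [loF, hiF, h]⟩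
      · intro h; exact mem_range_of_le a b ha (by omega) h
  | succ n ih =>
      intro b hb
      simp only [climbLoop]
      by_cases hab : a < b
      · simp only [if_pos hab]
        have hb0 : 0 ≤ b := by omega
        have hple := parent_le b hb0
        rw [ih (PySem.Int.floordiv (b - 1) 2) (by omega)]
        constructor
        · rintro ⟨k, hk1, hk2⟩
          refine ⟨k + 1, ?_, ?_⟩
          · simpa [loF] using ((parent_range (loF a k) (hiF a k) b).mp ⟨hk1, hk2⟩).1
          · simpa [hiF] using ((parent_range (loF a k) (hiF a k) b).mp ⟨hk1, hk2⟩).2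
        · rintro ⟨k, hk1, hk2⟩
          cases k with
          | zero => simp [loF, hiF] at hk1 hk2; omega
          | succ j =>
              simp only [loF, hiF] at hk1 hk2
              exact ⟨j, (parent_range (loF a j) (hiF a j) b).mpr ⟨hk1, hk2⟩⟩
      · simp only [if_neg hab]
        constructor
        · intro h; exact ⟨0, by simp [loF, hiF, h]⟩
        · intro h; exact mem_range_of_le a b ha (by omega) h

-- B's loop computes: true  ↔  b lies in some level range within fuel
theorem des_iff (b : Int) :
    ∀ (n : Nat) (lo hi : Int), -1 ≤ lo →
      (desLoop b n lo hi = true ↔ ∃ k < n, loF lo k ≤ b ∧ b ≤ hiF hi k) := by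
  intro n
  induction n with
  | zero => intro lo hi _; simp [desLoop]
  | succ n ih =>
      intro lo hi hlo
      simp only [desLoop]
      by_cases h1 : lo ≤ b
      · simp only [if_pos h1]
        by_cases h2 : b ≤ hi
        · simp only [if_pos h2, true_iff]
          exact ⟨0, by omega, by simp [loF, hiF]; omega⟩
        · simp only [if_neg h2]
          rw [ih (2 * lo + 1) (2 * hi + 2) (by omega)]
          constructor
          · rintro ⟨k, hk, hk1, hk2⟩
            rw [loF_shift] at hk1; rw [hiF_shift] at hk2
            exact ⟨k + 1, by omega, hk1, hk2⟩
          · rintro ⟨k, hk, hk1, hk2⟩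
            cases k with
            | zero => simp [loF, hiF] at hk1 hk2; omega
            | succ j =>
                refine ⟨j, by omega, ?_, ?_⟩
                · rw [loF_shift]; exact hk1
                · rw [hiF_shift]; exact hk2
      · simp only [if_neg h1]
        refine iff_of_false (by simp) ?_
        rintro ⟨k, hk, hk1, hk2⟩
        have := loF_ge lo hlo k
        omega

-- any witnessing level can be found below B's fuel bound
theorem bounded_witness (a b : Int) (ha : -1 ≤ a) (hab : a < b)
    (h : ∃ k, loF a k ≤ b ∧ b ≤ hiF a k) :
    ∃ k < (b - a).toNat + 2, loF a k ≤ b ∧ b ≤ hiF a k := by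
  rcases eq_or_lt_of_le ha with h1 | h1
  · refine ⟨b.toNat + 1, by omega, ?_, ?_⟩
    · rw [← h1, loF_neg_one]; omega
    · rw [← h1]
      have := hiF_neg_one_grow (b.toNat + 1)
      omega
  · obtain ⟨k, hk1, hk2⟩ := h
    have := loF_grow a (by omega) k
    refine ⟨k, by omega, hk1, hk2⟩

-- ===== VERDICT (by name: the statement is the Claim_ definition above) =====
theorem checkDescendant_spec : Claim_equal_checkDescendant := by
  intro a b _ hPre
  unfold Spec_checkDescendant checkDescendant checkDescendant_alt
  by_cases ha0 : a = 0
  · simp [ha0]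
  · simp only [if_neg ha0]
    by_cases hab : a < b
    · have ha : -1 ≤ a := by
        rcases hPre with h | h
        · exact h
        · omega
      have hA := climb_iff a ha ((b - a).toNat + 1) b (by omega)
      have hB := des_iff b ((b - a).toNat + 2) a a ha
      rcases hcb : desLoop b ((b - a).toNat + 2) a a with _ | _
      · simp only [decide_eq_false_iff_not]
        intro hEq
        have := bounded_witness a b ha hab (hA.mp hEq.symm)
        rw [hcb] at hB
        simp at hB
        obtain ⟨k, hk, hk1, hk2⟩ := this
        exact absurd (hB k hk hk1) (by omega)
      · rw [hcb] at hB
        simp only [decide_eq_true_eq]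
        obtain ⟨k, _, hk1, hk2⟩ := hB.mp rfl
        exact (hA.mpr ⟨k, hk1, hk2⟩).symm
    · -- b ≤ a: A's loop runs zero iterations; B's first test decides
      have hfa : (b - a).toNat = 0 := by omega
      rw [hfa]
      simp only [climbLoop, desLoop, if_neg hab]
      by_cases hba : a ≤ b
      · have : b = a := by omega
        simp [this]
      · simp only [if_neg hba]
        simp
        omega
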